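-- pv_equiv track=rewrite | github.com/nowarp/skry | src/analysis/call_graph.py | get_transitive_callees
-- ===== SOURCE A (Python) =====
-- from typing import Dict, List, Set, Optional, TYPE_CHECKING
--
-- def get_transitive_callees(
--     func_name: str,
--     call_graph: Dict[str, Set[str]],
--     visited: Optional[Set[str]] = None,
--     max_depth: int = 10,
-- ) -> List[str]:
--     """
--     Get all transitive callees, bottom-up order (deepest first).
--
--     Used for building call traces for LLM context.
--     """
--     if visited is None:
--         visited = set()
--
--     if func_name in visited or max_depth <= 0:
--         return []
--     visited.add(func_name)
--
--     result_set: Set[str] = set()  # O(1) lookup for dedup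
--     result_order: List[str] = []  # Preserve insertion order
--     callees = call_graph.get(func_name, set())
--
--     for callee in callees:
--         # Recursively get callee's callees FIRST (no copy - backtrack instead)
--         nested = get_transitive_callees(callee, call_graph, visited, max_depth - 1)
--         for nested_callee in nested:
--             if nested_callee not in result_set:
--                 result_set.add(nested_callee)
--                 result_order.append(nested_callee)
--         # Then add callee itself
--         if callee not in result_set:
--             result_set.add(callee)
--             result_order.append(callee)
--
--     visited.remove(func_name)  # Backtrack for other call paths
--     return result_order
-- ===== SOURCE B (Python) =====
-- from typing import Dict, List, Set, Optional
--
--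
-- def get_transitive_callees(
--     func_name: str,
--     call_graph: Dict[str, Set[str]],
--     visited: Optional[Set[str]] = None,
--     max_depth: int = 10,
-- ) -> List[str]:
--     """Transitive callees, bottom-up (deepest first), first occurrence kept.
--
--     Different decomposition: a plain post-order emitter that appends every
--     callee (duplicates included) to one shared list, followed by a single
--     first-occurrence dedup pass at the end, instead of per-level
--     result_set/result_order bookkeeping.
--     """
--     if visited is None:
--         visited = set()
--
--     out: List[str] = []
--
--     def emit(node: str, depth: int) -> None:
--         if node in visited or depth <= 0:
--             return
--         visited.add(node)
--         for callee in call_graph.get(node, set()):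
--             emit(callee, depth - 1)
--             out.append(callee)
--         visited.remove(node)  # backtrack for other call paths
--
--     emit(func_name, max_depth)
--
--     seen: Set[str] = set()
--     result: List[str] = []
--     for name in out:
--         if name not in seen:
--             seen.add(name)
--             result.append(name)
--     return result
-- ===== Notes on version B (the rewrite author's own statement) =====
-- stated objective: alternative
-- what changed: A dedups incrementally at every recursion level with a per-level result_set/result_order pair and rescans each child's deduped result into its parent; B traverses once with a plain post-order emitter appending every callee (duplicates included) to one shared list and performs a single first-occurrence dedup pass at the end.
import Mathlib
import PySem

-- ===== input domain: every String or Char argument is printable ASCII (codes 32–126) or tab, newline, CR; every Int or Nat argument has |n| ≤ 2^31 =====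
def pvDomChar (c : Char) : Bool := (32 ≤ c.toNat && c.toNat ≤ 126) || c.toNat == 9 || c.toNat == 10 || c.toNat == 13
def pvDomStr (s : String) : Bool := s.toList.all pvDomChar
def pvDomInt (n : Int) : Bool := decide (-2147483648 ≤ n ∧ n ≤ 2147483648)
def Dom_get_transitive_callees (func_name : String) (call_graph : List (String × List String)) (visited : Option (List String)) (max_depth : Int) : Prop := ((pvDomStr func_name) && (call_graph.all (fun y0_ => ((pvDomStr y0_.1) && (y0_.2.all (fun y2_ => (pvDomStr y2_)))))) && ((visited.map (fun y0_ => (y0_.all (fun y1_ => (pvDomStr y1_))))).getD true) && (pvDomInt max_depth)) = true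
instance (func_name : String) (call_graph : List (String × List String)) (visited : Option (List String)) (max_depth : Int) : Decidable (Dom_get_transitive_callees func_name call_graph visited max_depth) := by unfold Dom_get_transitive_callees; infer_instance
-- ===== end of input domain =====

-- B replaces A's per-level result_set/result_order bookkeeping by a raw post-order emission into one
-- shared list followed by a single first-occurrence dedup pass (objective: alternative decomposition).
-- Both Pythons temporarily mutate a caller-supplied `visited` but restore it before returning
-- (net effect none); the theorems are about the return value.

-- ===== PORT A =====
-- 'if nested_callee not in result_set: result_set.add(…); result_order.append(…)'
def pvStepA (st : PySem.Set String × List String) (x : String) : PySem.Set String × List String :=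
  if PySem.Set.contains st.1 x then st else (PySem.Set.add st.1 x, st.2 ++ [x])

-- the recursive body of A after the 'visited is None' default has been resolved
def pvGoA (call_graph : List (String × List String)) (func_name : String)
    (visited : PySem.Set String) (max_depth : Int) : List String :=
  if _h : PySem.Set.contains visited func_name ∨ max_depth ≤ 0 then []
  else
    -- visited.add(func_name); visited.remove(func_name) at the end restores it, so the
    -- recursive calls simply receive the extended set (pure rendering of the backtracking)
    let v' := PySem.Set.add visited func_name
    let callees := PySem.Dict.getD ⟨call_graph⟩ func_name []
    (callees.foldl (fun st callee =>
        pvStepA ((pvGoA call_graph callee v' (max_depth - 1)).foldl pvStepA st) callee)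
      (PySem.Set.empty, [])).2
termination_by max_depth.toNat
decreasing_by
  rcases not_or.mp _h with ⟨-, h2⟩; omega

def get_transitive_callees (func_name : String) (call_graph : List (String × List String)) (visited : Option (List String)) (max_depth : Int) : List String :=
  let v : PySem.Set String := match visited with
    | none => PySem.Set.empty
    | some l => PySem.Set.ofList l
  pvGoA call_graph func_name v max_depth

-- ===== PORT B =====
-- B's `emit`: appends every callee (duplicates and all) to one shared out-list, post-order
def pvRawB (call_graph : List (String × List String)) (node : String)
    (visited : PySem.Set String) (depth : Int) : List String :=
  if _h : PySem.Set.contains visited node ∨ depth ≤ 0 then []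
  else
    let v' := PySem.Set.add visited node
    (PySem.Dict.getD ⟨call_graph⟩ node []).foldl
      (fun out callee => out ++ pvRawB call_graph callee v' (depth - 1) ++ [callee]) []
termination_by depth.toNat
decreasing_by
  rcases not_or.mp _h with ⟨-, h2⟩; omega

def get_transitive_callees_alt (func_name : String) (call_graph : List (String × List String)) (visited : Option (List String)) (max_depth : Int) : List String :=
  let v : PySem.Set String := match visited with
    | none => PySem.Set.empty
    | some l => PySem.Set.ofList l
  let out := pvRawB call_graph func_name v max_depth
  -- 'if name not in seen: seen.add(name); result.append(name)'
  (out.foldl (fun st name =>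
      if PySem.Set.contains st.1 name then st else (PySem.Set.add st.1 name, st.2 ++ [name]))
    (PySem.Set.empty, [])).2

-- ===== PRECONDITION & SPEC =====
def Spec_get_transitive_callees (func_name : String) (call_graph : List (String × List String)) (visited : Option (List String)) (max_depth : Int) (out : List String) : Prop := out = get_transitive_callees_alt func_name call_graph visited max_depth
instance (func_name : String) (call_graph : List (String × List String)) (visited : Option (List String)) (max_depth : Int) (out : List String) : Decidable (Spec_get_transitive_callees func_name call_graph visited max_depth out) := by unfold Spec_get_transitive_callees; infer_instance

-- ===== CLAIM (what is proved, stated in full; the proofs are below) =====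
def Claim_equal_get_transitive_callees : Prop := ∀ (func_name : String) (call_graph : List (String × List String)) (visited : Option (List String)) (max_depth : Int), Dom_get_transitive_callees func_name call_graph visited max_depth → Spec_get_transitive_callees func_name call_graph visited max_depth (get_transitive_callees func_name call_graph visited max_depth)

-- ===== LEMMAS AND PROOFS =====

-- first-occurrence dedup relative to a seen-set: the emitted list …
def pvDdE (s : PySem.Set String) : List String → List String
  | [] => []
  | x :: xs => if x ∈ s then pvDdE s xs else x :: pvDdE (PySem.Set.add s x) xs

-- … and the resulting seen-set
def pvDdS (s : PySem.Set String) : List String → PySem.Set String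
  | [] => s
  | x :: xs => if x ∈ s then pvDdS s xs else pvDdS (PySem.Set.add s x) xs

theorem pvFoldl_step (xs : List String) (s : PySem.Set String) (l : List String) :
    xs.foldl pvStepA (s, l) = (pvDdS s xs, l ++ pvDdE s xs) := by
  induction xs generalizing s l with
  | nil => simp [pvDdS, pvDdE]
  | cons x xs ih =>
    by_cases hx : x ∈ s <;>
      simp [pvStepA, PySem.Set.contains, pvDdS, pvDdE, hx, ih, List.append_assoc]

theorem pvDdE_append (xs ys : List String) (s : PySem.Set String) :
    pvDdE s (xs ++ ys) = pvDdE s xs ++ pvDdE (pvDdS s xs) ys := by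
  induction xs generalizing s with
  | nil => simp [pvDdS, pvDdE]
  | cons x xs ih =>
    by_cases hx : x ∈ s <;> simp [pvDdE, pvDdS, hx, ih]

theorem pvDdS_append (xs ys : List String) (s : PySem.Set String) :
    pvDdS s (xs ++ ys) = pvDdS (pvDdS s xs) ys := by
  induction xs generalizing s with
  | nil => simp [pvDdS]
  | cons x xs ih =>
    by_cases hx : x ∈ s <;> simp [pvDdS, hx, ih]

-- deduping an already-deduped list: only the outer seen-set matters
theorem pvDdE_ddE (xs : List String) (s t : PySem.Set String)
    (hsub : ∀ y, y ∈ s → y ∈ t) : pvDdE t (pvDdE s xs) = pvDdE t xs := by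
  induction xs generalizing s t with
  | nil => simp [pvDdE]
  | cons x xs ih =>
    by_cases hx : x ∈ s
    · simp [pvDdE, hx, hsub x hx, ih s t hsub]
    · by_cases htx : x ∈ t
      · simp only [pvDdE, if_neg hx, if_pos htx]
        exact ih (PySem.Set.add s x) t
          (fun y hy => by rcases (PySem.Set.mem_add s x y).mp hy with h | h
                          · exact hsub y h
                          · exact h ▸ htx)
      · simp only [pvDdE, if_neg hx, if_neg htx, List.cons.injEq, true_and]
        exact ih (PySem.Set.add s x) (PySem.Set.add t x)
          (fun y hy => by rcases (PySem.Set.mem_add s x y).mp hy with h | h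
                          · exact (PySem.Set.mem_add t x y).mpr (Or.inl (hsub y h))
                          · exact (PySem.Set.mem_add t x y).mpr (Or.inr h))

theorem pvDdS_ddE (xs : List String) (s t : PySem.Set String)
    (hsub : ∀ y, y ∈ s → y ∈ t) : pvDdS t (pvDdE s xs) = pvDdS t xs := by
  induction xs generalizing s t with
  | nil => simp [pvDdE, pvDdS]
  | cons x xs ih =>
    by_cases hx : x ∈ s
    · simp [pvDdE, pvDdS, hx, hsub x hx, ih s t hsub]
    · by_cases htx : x ∈ t
      · simp only [pvDdE, pvDdS, if_neg hx, if_pos htx]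
        exact ih (PySem.Set.add s x) t
          (fun y hy => by rcases (PySem.Set.mem_add s x y).mp hy with h | h
                          · exact hsub y h
                          · exact h ▸ htx)
      · simp only [pvDdE, pvDdS, if_neg hx, if_neg htx]
        exact ih (PySem.Set.add s x) (PySem.Set.add t x)
          (fun y hy => by rcases (PySem.Set.mem_add s x y).mp hy with h | h
                          · exact (PySem.Set.mem_add t x y).mpr (Or.inl (hsub y h))
                          · exact (PySem.Set.mem_add t x y).mpr (Or.inr h))

theorem pvEmpty_sub (s : PySem.Set String) : ∀ y : String, y ∈ (PySem.Set.empty : PySem.Set String) → y ∈ s := by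
  intro y hy; simp [PySem.Set.empty] at hy

-- A's per-callee loop, assuming the recursive calls are already characterised
theorem pvLoopA (g : List (String × List String)) (v' : PySem.Set String) (d : Int)
    (hgo : ∀ c, pvGoA g c v' d = pvDdE PySem.Set.empty (pvRawB g c v' d)) :
    ∀ (cs : List String) (s : PySem.Set String) (l : List String),
      cs.foldl (fun st callee => pvStepA ((pvGoA g callee v' d).foldl pvStepA st) callee) (s, l)
        = (pvDdS s (cs.flatMap (fun c => pvRawB g c v' d ++ [c])),
           l ++ pvDdE s (cs.flatMap (fun c => pvRawB g c v' d ++ [c]))) := by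
  intro cs
  induction cs with
  | nil => intro s l; simp [pvDdS, pvDdE]
  | cons c cs ih =>
    intro s l
    have h1 : (pvGoA g c v' d).foldl pvStepA (s, l)
        = (pvDdS s (pvRawB g c v' d), l ++ pvDdE s (pvRawB g c v' d)) := by
      rw [hgo c, pvFoldl_step, pvDdE_ddE _ _ _ (pvEmpty_sub s), pvDdS_ddE _ _ _ (pvEmpty_sub s)]
    have h2 : pvStepA (pvDdS s (pvRawB g c v' d), l ++ pvDdE s (pvRawB g c v' d)) c
        = (pvDdS s (pvRawB g c v' d ++ [c]), l ++ pvDdE s (pvRawB g c v' d ++ [c])) := by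
      by_cases hc : c ∈ pvDdS s (pvRawB g c v' d) <;>
        simp [pvStepA, PySem.Set.contains, pvDdS_append, pvDdE_append, pvDdS, pvDdE, hc]
    simp only [List.foldl_cons, h1, h2, ih, List.flatMap_cons, pvDdS_append, pvDdE_append,
      List.append_assoc]

-- the central characterisation: A's recursion = dedup of B's raw post-order emission
theorem pvGoA_eq (n : Nat) : ∀ (d : Int), d.toNat ≤ n →
    ∀ (g : List (String × List String)) (f : String) (v : PySem.Set String),
      pvGoA g f v d = pvDdE PySem.Set.empty (pvRawB g f v d) := by
  induction n with
  | zero =>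
    intro d hd g f v
    rw [pvGoA, pvRawB]
    have hle : d ≤ 0 := by omega
    simp [hle, pvDdE]
  | succ m ih =>
    intro d hd g f v
    rw [pvGoA, pvRawB]
    by_cases hg : f ∈ v ∨ d ≤ 0
    · simp [hg, pvDdE]
    · have hg' : ¬(PySem.Set.contains v f = true ∨ d ≤ 0) := by
        simpa [PySem.Set.contains] using hg
      simp only [dif_neg hg']
      have hd1 : (d - 1).toNat ≤ m := by
        rcases not_or.mp hg with ⟨-, h2⟩; omega
      rw [pvLoopA g (PySem.Set.add v f) (d - 1) (fun c => ih (d - 1) hd1 g c _)]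
      have hfn : (fun out callee => out ++ pvRawB g callee (PySem.Set.add v f) (d - 1) ++ [callee])
          = (fun (out : List String) callee => out ++ (pvRawB g callee (PySem.Set.add v f) (d - 1) ++ [callee])) := by
        funext out callee; rw [List.append_assoc]
      rw [hfn, PySem.List.foldl_append_eq_flatMap (fun c => pvRawB g c (PySem.Set.add v f) (d - 1) ++ [c])]
      simp

-- ===== VERDICT (by name: the statement is the Claim_ definition above) =====
theorem get_transitive_callees_spec : Claim_equal_get_transitive_callees := by
  intro f g vis d _
  unfold Spec_get_transitive_callees get_transitive_callees get_transitive_callees_alt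
  have hBA : (fun (st : PySem.Set String × List String) (name : String) =>
      if PySem.Set.contains st.1 name then st else (PySem.Set.add st.1 name, st.2 ++ [name])) = pvStepA := rfl
  simp only [hBA, pvFoldl_step]
  rw [pvGoA_eq (d.toNat) d le_rfl]
  simp
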